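-- pv_equiv track=rewrite | github.com/NUSTM/GCDDA | da/post_process.py | is_clean_tag
-- ===== SOURCE A (Python) =====
-- def is_clean_tag(tag_list):
--     prev_pos, prev_lab = None, None
--     found = True
--     for tag in tag_list:
--         # if tag != "O":
--         #     found = True
--         pos, lab = tag[:2], tag[2:]
--         if pos not in {"B-", "I-", "E-", "S-", "O"}:
--             return False
--
--         if prev_lab is not None:
--             if pos in {"I-", "E-"} and lab != prev_lab:  # type conflict
--                 return False
--         prev_pos, prev_lab = pos, lab
--     # if prev_pos not in {"E-", "S-", "O"}:  # not end well
--     #     return False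
--     if not found:
--         return False
--     return True
-- ===== SOURCE B (Python) =====
-- def is_clean_tag(tag_list):
--     allowed = {"B-", "I-", "E-", "S-", "O"}
--     inside = {"I-", "E-"}
--     rest = tag_list
--     first = True
--     while rest:
--         head = rest[0]
--         pos = head[:2]
--         if pos not in allowed or (not first and pos in inside):
--             return False
--         run_suf = head[2:]
--         rest = rest[1:]
--         while rest and rest[0][2:] == run_suf:
--             if rest[0][:2] not in allowed:
--                 return False
--             rest = rest[1:]
--         first = False
--     return True
-- ===== Notes on version B (the rewrite author's own statement) =====
-- stated objective: alternative
-- what changed: B traverses the list as maximal runs of equal type suffix: an outer loop validates each run head (must not be I-/E- except at the start) and an inner loop skips tags whose suffix equals the run's, checking only prefix validity inside a run; no prev_lab state carried tag-to-tag and no adjacent-pair comparison.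
import Mathlib
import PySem

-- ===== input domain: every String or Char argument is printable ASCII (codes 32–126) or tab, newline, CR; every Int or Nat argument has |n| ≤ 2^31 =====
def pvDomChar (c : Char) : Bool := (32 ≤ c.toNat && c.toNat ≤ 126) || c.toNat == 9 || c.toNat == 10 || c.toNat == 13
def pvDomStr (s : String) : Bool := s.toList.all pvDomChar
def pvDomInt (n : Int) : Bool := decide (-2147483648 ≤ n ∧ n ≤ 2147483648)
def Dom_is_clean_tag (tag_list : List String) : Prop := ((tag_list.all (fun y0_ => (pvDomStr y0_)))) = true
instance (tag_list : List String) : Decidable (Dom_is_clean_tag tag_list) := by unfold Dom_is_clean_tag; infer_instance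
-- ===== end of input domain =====

-- B replaces A's tag-by-tag loop with prev_lab state by a run-based traversal: an outer
-- loop over maximal runs of equal type suffix and an inner loop skipping within-run tags.

-- ===== PORT A =====
-- A's loop: state prev_lab (prev_pos is carried in Python but never read); early return False
def is_clean_tag_loop (l : List String) (prev_lab : Option String) : Bool :=
  match l with
  | [] => true
  | tag :: rest =>
    let pos := PySem.Str.slice tag none (some 2)
    let lab := PySem.Str.slice tag (some 2) none
    if !(["B-", "I-", "E-", "S-", "O"] : List String).contains pos then
      false
    else if (match prev_lab with
             | some pl => (["I-", "E-"] : List String).contains pos && lab != pl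
             | none => false) then
      false
    else
      is_clean_tag_loop rest (some lab)

def is_clean_tag (tag_list : List String) : Bool :=
  let found := true
  if is_clean_tag_loop tag_list none then
    if !found then false else true
  else false

-- ===== PORT B =====
-- inner while: skip tags whose suffix equals run_suf, checking prefix validity;
-- returns (false, _) for Source B's inner "return False", else (true, remaining rest)
def pvSkipRun (run_suf : String) (rest : List String) : Bool × List String :=
  match rest with
  | [] => (true, [])
  | t :: r =>
    if PySem.Str.slice t (some 2) none == run_suf then
      if !(["B-", "I-", "E-", "S-", "O"] : List String).contains
          (PySem.Str.slice t none (some 2)) then (false, r)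
      else pvSkipRun run_suf r
    else (true, t :: r)

theorem pvSkipRun_len (run_suf : String) (rest : List String) :
    (pvSkipRun run_suf rest).2.length ≤ rest.length := by
  induction rest with
  | nil => simp [pvSkipRun]
  | cons t r ih =>
    simp only [pvSkipRun]
    split_ifs <;> simp
    omega

-- outer while over runs
def pvOuter (first : Bool) (rest : List String) : Bool :=
  match rest with
  | [] => true
  | head :: r =>
    let pos := PySem.Str.slice head none (some 2)
    if !(["B-", "I-", "E-", "S-", "O"] : List String).contains pos
        || (!first && (["I-", "E-"] : List String).contains pos) then false
    else
      let res := pvSkipRun (PySem.Str.slice head (some 2) none) r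
      if res.1 then pvOuter false res.2 else false
  termination_by rest.length
  decreasing_by
    have := pvSkipRun_len (PySem.Str.slice head (some 2) none) r
    simp at this ⊢; omega

def is_clean_tag_alt (tag_list : List String) : Bool := pvOuter true tag_list

-- ===== PRECONDITION & SPEC =====
def Spec_is_clean_tag (tag_list : List String) (out : Bool) : Prop := out = is_clean_tag_alt tag_list
instance (tag_list : List String) (out : Bool) : Decidable (Spec_is_clean_tag tag_list out) := by unfold Spec_is_clean_tag; infer_instance

-- ===== CLAIM (what is proved, stated in full; the proofs are below) =====
def Claim_equal_is_clean_tag : Prop := ∀ (tag_list : List String), Dom_is_clean_tag tag_list → Spec_is_clean_tag tag_list (is_clean_tag tag_list)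

-- ===== LEMMAS AND PROOFS =====

-- proof helpers: prefix test, inside test, per-tag consistency test, A's suffix chain
def pvP (t : String) : Bool :=
  (["B-", "I-", "E-", "S-", "O"] : List String).contains (PySem.Str.slice t none (some 2))

def pvIE (t : String) : Bool :=
  (["I-", "E-"] : List String).contains (PySem.Str.slice t none (some 2))

def pvOk (pl : String) (t : String) : Bool :=
  !(pvIE t && PySem.Str.slice t (some 2) none != pl)

def pvChain (pl : String) : List String → Bool
  | [] => true
  | t :: r => pvOk pl t && pvChain (PySem.Str.slice t (some 2) none) r

theorem contains_eq_pvP (t : String) :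
    (["B-", "I-", "E-", "S-", "O"] : List String).contains (PySem.Str.slice t none (some 2)) = pvP t := rfl

theorem contains_eq_pvIE (t : String) :
    (["I-", "E-"] : List String).contains (PySem.Str.slice t none (some 2)) = pvIE t := rfl

-- A's loop with a previous label = prefix validity && the suffix chain
theorem loop_eq_chain (l : List String) (pl : String) :
    is_clean_tag_loop l (some pl) = (l.all pvP && pvChain pl l) := by
  induction l generalizing pl with
  | nil => simp [is_clean_tag_loop, pvChain]
  | cons t r ih =>
    rw [is_clean_tag_loop]
    simp only [contains_eq_pvP, contains_eq_pvIE, List.all_cons, pvChain, pvOk]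
    by_cases hP : pvP t = true
    · by_cases hC : (pvIE t && PySem.Str.slice t (some 2) none != pl) = true
      · simp [hP, hC]
      · have hC' : (pvIE t && PySem.Str.slice t (some 2) none != pl) = false :=
          Bool.eq_false_iff.mpr hC
        simp [hP, hC', ih]
    · have hP' : pvP t = false := Bool.eq_false_iff.mpr hP
      simp [hP']

-- B's run phase: the skipRun followed by pvOuter false
def pvRunPhase (run_suf : String) (rest : List String) : Bool :=
  if (pvSkipRun run_suf rest).1 then pvOuter false (pvSkipRun run_suf rest).2 else false

theorem outer_false_eq (t : String) (r : List String) :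
    pvOuter false (t :: r) =
      (pvP t && !pvIE t && pvRunPhase (PySem.Str.slice t (some 2) none) r) := by
  rw [pvOuter]
  simp only [contains_eq_pvP, contains_eq_pvIE, pvRunPhase, Bool.not_false, Bool.true_and]
  cases hP : pvP t
  · simp
  · cases hI : pvIE t
    · simp
    · simp

theorem skipRun_stay (suf : String) (t : String) (r : List String)
    (hs : PySem.Str.slice t (some 2) none = suf) (hp : pvP t = true) :
    pvSkipRun suf (t :: r) = pvSkipRun suf r := by
  rw [pvSkipRun]
  simp only [contains_eq_pvP, hs, hp]
  simp

theorem skipRun_fail (suf : String) (t : String) (r : List String)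
    (hs : PySem.Str.slice t (some 2) none = suf) (hp : pvP t = false) :
    pvSkipRun suf (t :: r) = (false, r) := by
  rw [pvSkipRun]
  simp only [contains_eq_pvP, hs, hp]
  simp

theorem skipRun_exit (suf : String) (t : String) (r : List String)
    (hs : ¬ PySem.Str.slice t (some 2) none = suf) :
    pvSkipRun suf (t :: r) = (true, t :: r) := by
  rw [pvSkipRun]
  simp [hs]

theorem runPhase_eq_chain (l : List String) (suf : String) :
    pvRunPhase suf l = (l.all pvP && pvChain suf l) := by
  induction l generalizing suf with
  | nil => simp [pvRunPhase, pvSkipRun, pvChain, pvOuter]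
  | cons t r ih =>
    by_cases hs : PySem.Str.slice t (some 2) none = suf
    · cases hP : pvP t
      · rw [pvRunPhase, skipRun_fail suf t r hs hP]
        simp [pvChain, hP]
      · rw [pvRunPhase, skipRun_stay suf t r hs hP, ← pvRunPhase, ih]
        simp [pvChain, pvOk, hs, hP]
    · rw [pvRunPhase, skipRun_exit suf t r hs]
      simp only [if_pos]
      rw [outer_false_eq, ih]
      have hok : pvOk suf t = !pvIE t := by
        cases hI : pvIE t <;> simp [pvOk, hI, hs]
      simp only [pvChain, hok, List.all_cons]
      cases pvP t <;> cases pvIE t <;> cases r.all pvP <;>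
        cases pvChain (PySem.Str.slice t (some 2) none) r <;> rfl

-- ===== VERDICT (by name: the statement is the Claim_ definition above) =====
theorem is_clean_tag_spec : Claim_equal_is_clean_tag := by
  intro l _
  show is_clean_tag l = is_clean_tag_alt l
  cases l with
  | nil =>
    simp only [is_clean_tag, is_clean_tag_alt, is_clean_tag_loop]
    rw [pvOuter]
    simp
  | cons t r =>
    simp only [is_clean_tag, is_clean_tag_alt]
    rw [is_clean_tag_loop, pvOuter]
    simp only [contains_eq_pvP, contains_eq_pvIE, Bool.not_true, Bool.false_and, Bool.or_false]
    by_cases hP : pvP t = true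
    · rw [loop_eq_chain]
      have h2 := runPhase_eq_chain r (PySem.Str.slice t (some 2) none)
      rw [pvRunPhase] at h2
      rw [← h2]
      simp [hP]
    · have hP' : pvP t = false := Bool.eq_false_iff.mpr hP
      simp [hP']
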